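-- pv_equiv track=rewrite | github.com/Smrutishreya2002/IR-Model-Evaluation | E_Evaluation/b_top10results2.py | taat_score
-- ===== SOURCE A (Python) =====
-- from collections import defaultdict
--
-- def taat_score(query_terms, index):
--     scores = defaultdict(int)
--     for term in query_terms:
--         if term not in index:
--             continue
--         for doc, tf in index[term].items():
--             scores[doc] += tf
--     ranked = sorted(scores.items(), key=lambda x: (-x[1], x[0]))
--     return [doc for doc, _ in ranked]
-- ===== SOURCE B (Python) =====
-- def taat_score(query_terms, index):
--     # Document-at-a-time: build the candidate doc list (first-appearance order),
--     # then compute each doc's score independently; no cross-term accumulator dict.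
--     present = [t for t in query_terms if t in index]
--     docs = []
--     seen = set()
--     for t in present:
--         for d in index[t]:
--             if d not in seen:
--                 seen.add(d)
--                 docs.append(d)
--     postings = [(d, tf) for t in present for d, tf in index[t].items()]
--     pairs = [(d, sum(tf for d2, tf in postings if d2 == d)) for d in docs]
--     pairs.sort(key=lambda x: (-x[1], x[0]))
--     return [d for d, _ in pairs]
-- ===== Notes on version B (the rewrite author's own statement) =====
-- stated objective: alternative
-- what changed: Replaced A's term-at-a-time fold into a cross-term accumulator dict by document-at-a-time scoring: B first builds the candidate-document list from the postings of the query terms present in the index, then computes each document's score independently as a sum over the concatenated postings, and sorts the same way.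
import Mathlib
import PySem

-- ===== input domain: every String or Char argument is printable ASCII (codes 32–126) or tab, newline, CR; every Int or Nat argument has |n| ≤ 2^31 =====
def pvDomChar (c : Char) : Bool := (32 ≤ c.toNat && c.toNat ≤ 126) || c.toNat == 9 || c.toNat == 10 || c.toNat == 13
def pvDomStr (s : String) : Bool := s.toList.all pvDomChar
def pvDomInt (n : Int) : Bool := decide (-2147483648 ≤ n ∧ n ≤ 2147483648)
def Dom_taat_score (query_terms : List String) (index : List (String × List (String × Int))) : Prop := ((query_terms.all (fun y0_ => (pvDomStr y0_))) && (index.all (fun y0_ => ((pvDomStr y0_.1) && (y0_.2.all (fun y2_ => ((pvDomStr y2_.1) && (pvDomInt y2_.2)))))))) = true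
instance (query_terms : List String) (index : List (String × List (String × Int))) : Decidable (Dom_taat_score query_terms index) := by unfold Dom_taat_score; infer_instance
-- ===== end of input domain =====

-- B scores document-at-a-time (candidate docs first, then an independent per-doc sum)
-- instead of A's term-at-a-time accumulator dict; objective: alternative decomposition, same result.

-- ===== PORT A =====
def taat_score (query_terms : List String) (index : List (String × List (String × Int))) : List String :=
  let idx : PySem.Dict String (List (String × Int)) := PySem.Dict.mk index
  let scores : PySem.Dict String Int :=
    query_terms.foldl (fun scores term =>
      if idx.contains term then
        (idx.getD term []).foldl (fun scores p => scores.modify p.1 0 (· + p.2)) scores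
      else scores) PySem.Dict.empty
  let ranked := PySem.List.sorted2 scores.items (fun x => -x.2) (fun x => x.1) false
  ranked.map (fun p => p.1)

-- ===== PORT B =====
def taat_score_alt (query_terms : List String) (index : List (String × List (String × Int))) : List String :=
  let idx : PySem.Dict String (List (String × Int)) := PySem.Dict.mk index
  let present := query_terms.filter (fun t => idx.contains t)
  let docs : PySem.Set String :=
    present.foldl (fun docs t => (idx.getD t []).foldl (fun docs p => PySem.Set.add docs p.1) docs) []
  let postings := present.flatMap (fun t => idx.getD t [])
  let pairs := docs.map (fun d => (d, ((postings.filter (fun p => p.1 == d)).map (fun p => p.2)).sum))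
  let ranked := PySem.List.sorted2 pairs (fun x => -x.2) (fun x => x.1) false
  ranked.map (fun p => p.1)

-- ===== PRECONDITION & SPEC =====
def Spec_taat_score (query_terms : List String) (index : List (String × List (String × Int))) (out : List String) : Prop := out = taat_score_alt query_terms index
instance (query_terms : List String) (index : List (String × List (String × Int))) (out : List String) : Decidable (Spec_taat_score query_terms index out) := by unfold Spec_taat_score; infer_instance

-- ===== CLAIM (what is proved, stated in full; the proofs are below) =====
def Claim_equal_taat_score : Prop := ∀ (query_terms : List String) (index : List (String × List (String × Int))), Dom_taat_score query_terms index → Spec_taat_score query_terms index (taat_score query_terms index)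

-- ===== LEMMAS AND PROOFS =====
theorem foldl_foldl_flatMap {α β δ : Type} (l : List α) (g : α → List β) (f : δ → β → δ) (init : δ) :
    l.foldl (fun d t => (g t).foldl f d) init = (l.flatMap g).foldl f init := by
  induction l generalizing init with
  | nil => rfl
  | cons a l ih => simp [List.flatMap_cons, List.foldl_append, ih]

theorem getD_foldl_modify_sum (l : List (String × Int)) (d : PySem.Dict String Int) (c : String) :
    (l.foldl (fun d p => d.modify p.1 0 (· + p.2)) d).getD c 0
      = d.getD c 0 + ((l.filter (fun p => p.1 == c)).map (fun p => p.2)).sum := by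
  induction l generalizing d with
  | nil => simp
  | cons p l ih =>
    simp only [List.foldl_cons, ih, List.filter_cons]
    by_cases h : p.1 = c
    · simp [h]
      ring
    · have h' : c ≠ p.1 := fun hc => h hc.symm
      simp [h, h', PySem.Dict.getD_modify]

theorem taat_score_eq (query_terms : List String) (index : List (String × List (String × Int))) :
    taat_score query_terms index = taat_score_alt query_terms index := by
  simp only [taat_score, taat_score_alt]
  set idx : PySem.Dict String (List (String × Int)) := PySem.Dict.mk index with hidx
  set present := query_terms.filter (fun t => idx.contains t) with hpresent
  set L := present.flatMap (fun t => idx.getD t []) with hL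
  -- A's fold skips absent terms: it is a fold over `present`, hence over the flat postings list L
  have hA : query_terms.foldl (fun scores term =>
        if idx.contains term then
          (idx.getD term []).foldl (fun scores p => scores.modify p.1 0 (· + p.2)) scores
        else scores) PySem.Dict.empty
      = L.foldl (fun scores p => scores.modify p.1 0 (· + p.2)) PySem.Dict.empty := by
    rw [← List.foldl_filter, ← hpresent, foldl_foldl_flatMap, ← hL]
  rw [hA]
  set scores := L.foldl (fun scores p => scores.modify p.1 0 (· + p.2)) PySem.Dict.empty with hscores
  -- B's candidate-doc set is the ordered dedup of the posting keys
  have hdocs : present.foldl (fun docs t => (idx.getD t []).foldl (fun docs p => PySem.Set.add docs p.1) docs) []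
      = PySem.Set.ofList (L.map (fun p => p.1)) := by
    rw [foldl_foldl_flatMap, ← hL, ← PySem.Set.update_map_eq_foldl_add, PySem.Set.update_nil_left]
  rw [hdocs]
  -- A's accumulator, listed as items, is exactly B's (doc, score) list
  have hkeys : scores.keys = PySem.Set.ofList (L.map (fun p => p.1)) := by
    rw [hscores]
    rw [PySem.Dict.keys_foldl_modify_key]
    simp [PySem.Set.update_nil_left]
  have hnodup : scores.keys.Nodup := by
    rw [hkeys]; exact PySem.Set.nodup_ofList _
  have hitems : scores.items
      = (PySem.Set.ofList (L.map (fun p => p.1))).map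
          (fun d => (d, ((L.filter (fun p => p.1 == d)).map (fun p => p.2)).sum)) := by
    rw [PySem.Dict.items_eq_map_keys scores hnodup 0, hkeys]
    refine List.map_congr_left (fun d _ => ?_)
    rw [hscores, getD_foldl_modify_sum]
    simp
  rw [hitems]

-- ===== VERDICT (by name: the statement is the Claim_ definition above) =====
theorem taat_score_spec : Claim_equal_taat_score := by
  intro query_terms index _
  unfold Spec_taat_score
  exact taat_score_eq query_terms index
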